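-- pv_equiv track=rewrite | github.com/Daniel-Berger/AI-Curriculum | Python-Learning/05-llms-and-genai/04-prompt-engineering/solutions.py | detect_injection_attempt
-- ===== SOURCE A (Python) =====
-- def detect_injection_attempt(user_input: str) -> bool:
--     """
--     Detect common prompt injection patterns.
--     """
--     dangerous_patterns = [
--         'ignore',
--         'override',
--         'forget',
--         'system:',
--         'previous instructions',
--         'new instructions',
--     ]
--
--     user_lower = user_input.lower()
--
--     for pattern in dangerous_patterns:
--         if pattern in user_lower:
--             return True
--
--     return False
-- ===== SOURCE B (Python) =====
-- def detect_injection_attempt(user_input: str) -> bool: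
--     """Detect common prompt injection patterns (single position-major scan)."""
--     patterns = (
--         'ignore',
--         'override',
--         'forget',
--         'system:',
--         'previous instructions',
--         'new instructions',
--     )
--     s = user_input.lower()
--     return any(s.startswith(p, i) for i in range(len(s)) for p in patterns)
-- ===== Notes on version B (the rewrite author's own statement) =====
-- stated objective: alternative
-- what changed: Replaced the pattern-major loop of six independent substring-containment scans by a single position-major left-to-right pass that at each index checks whether any pattern starts there.
import Mathlib
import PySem

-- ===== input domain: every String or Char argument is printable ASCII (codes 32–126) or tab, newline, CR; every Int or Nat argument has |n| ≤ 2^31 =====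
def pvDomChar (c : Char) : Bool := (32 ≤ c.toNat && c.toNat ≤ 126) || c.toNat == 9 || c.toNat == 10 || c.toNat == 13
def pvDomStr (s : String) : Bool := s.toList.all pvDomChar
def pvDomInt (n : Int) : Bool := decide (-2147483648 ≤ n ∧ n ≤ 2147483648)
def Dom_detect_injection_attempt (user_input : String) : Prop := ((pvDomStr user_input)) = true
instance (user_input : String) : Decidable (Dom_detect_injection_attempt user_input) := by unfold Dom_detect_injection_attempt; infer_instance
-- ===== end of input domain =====

-- B replaces A's pattern-major loop (six independent substring scans) by one
-- position-major left-to-right pass checking, at each index, whether any pattern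
-- starts there (objective: alternative).


-- ===== PORT A =====
def pvPatterns : List (List Char) :=
  ["ignore".toList, "override".toList, "forget".toList, "system:".toList,
   "previous instructions".toList, "new instructions".toList]

-- A's for-loop over the patterns with early return
def pvLoopA (s : List Char) : List (List Char) → Bool
  | [] => false
  | p :: ps => if PySem.Chars.isIn p s then true else pvLoopA s ps

def detect_injection_attempt (user_input : String) : Bool :=
  pvLoopA (PySem.Chars.lower user_input.toList) pvPatterns

-- ===== PORT B =====
-- B's scan over positions i = 0 .. len-1 (i.e. over the nonempty suffixes)
def pvLoopB (pats : List (List Char)) : List Char → Bool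
  | [] => false
  | c :: t => (pats.any fun p => PySem.Chars.startswith (c :: t) p) || pvLoopB pats t

def detect_injection_attempt_alt (user_input : String) : Bool :=
  pvLoopB pvPatterns (PySem.Chars.lower user_input.toList)

-- ===== PRECONDITION & SPEC =====
def Spec_detect_injection_attempt (user_input : String) (out : Bool) : Prop := out = detect_injection_attempt_alt user_input
instance (user_input : String) (out : Bool) : Decidable (Spec_detect_injection_attempt user_input out) := by unfold Spec_detect_injection_attempt; infer_instance

-- ===== CLAIM (what is proved, stated in full; the proofs are below) =====
def Claim_equal_detect_injection_attempt : Prop := ∀ (user_input : String), Dom_detect_injection_attempt user_input → Spec_detect_injection_attempt user_input (detect_injection_attempt user_input)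

-- ===== LEMMAS AND PROOFS =====

theorem pvLoopA_iff (s : List Char) (ps : List (List Char)) :
    pvLoopA s ps = true ↔ ∃ p ∈ ps, ∃ j, p <+: s.drop j := by
  induction ps with
  | nil => simp [pvLoopA]
  | cons p ps ih =>
    simp only [pvLoopA]
    split
    · rename_i h
      rw [← PySem.Chars.exists_prefix_drop_iff_isIn] at h
      simpa using Or.inl h
    · rename_i h
      rw [← PySem.Chars.exists_prefix_drop_iff_isIn] at h
      rw [ih]
      constructor
      · rintro ⟨q, hq, j, hj⟩; exact ⟨q, by simp [hq], j, hj⟩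
      · rintro ⟨q, hq, j, hj⟩
        rcases List.mem_cons.mp hq with rfl | hq
        · exact absurd ⟨j, hj⟩ h
        · exact ⟨q, hq, j, hj⟩

theorem pvLoopB_iff (pats : List (List Char)) (hne : ∀ p ∈ pats, p ≠ []) (s : List Char) :
    pvLoopB pats s = true ↔ ∃ p ∈ pats, ∃ j, p <+: s.drop j := by
  induction s with
  | nil =>
    simp only [pvLoopB, List.drop_nil]
    constructor
    · intro h; cases h
    · rintro ⟨p, hp, j, hj⟩
      exact absurd (List.prefix_nil.mp hj) (hne p hp)
  | cons c t ih =>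
    simp only [pvLoopB, Bool.or_eq_true, List.any_eq_true, ih]
    constructor
    · rintro (⟨p, hp, hsw⟩ | ⟨p, hp, j, hj⟩)
      · exact ⟨p, hp, 0, by simpa using (PySem.Chars.startswith_iff _ _).mp hsw⟩
      · exact ⟨p, hp, j + 1, by simpa using hj⟩
    · rintro ⟨p, hp, j, hj⟩
      cases j with
      | zero => exact Or.inl ⟨p, hp, (PySem.Chars.startswith_iff _ _).mpr (by simpa using hj)⟩
      | succ j => exact Or.inr ⟨p, hp, j, by simpa using hj⟩

-- ===== VERDICT (by name: the statement is the Claim_ definition above) =====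
theorem detect_injection_attempt_spec : Claim_equal_detect_injection_attempt := by
  intro user_input _
  unfold Spec_detect_injection_attempt detect_injection_attempt detect_injection_attempt_alt
  have hne : ∀ p ∈ pvPatterns, p ≠ [] := by decide
  rw [Bool.eq_iff_iff, pvLoopA_iff, pvLoopB_iff _ hne]
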